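-- pv_equiv track=rewrite | github.com/cutehammond772/problem-solving-archive | 백준/Gold/26075. 곰곰아 선 넘지마/곰곰아 선 넘지마.py | solve
-- ===== SOURCE A (Python) =====
-- def solve(N, M, S, T):
--   if N * M == 0:
--     return 0
--
--   # S와 T 내의 1을 왼쪽부터 하나씩 매칭시킨다. (-> 이동 횟수 최소)
--   # 다른 1과는 상관없이 독립적으로 이동 횟수를 세면 된다.
--   K, Z = 0, 0
--   s_off, t_off = 0, 0
--
--   # 총 이동 횟수가 홀수인 경우 1은 따로 Z에 저장한다.
--   # 이렇게 되면 마지막까지 X, Y (=K)가 동일해지며, 이후 Z를 적절히 나누어 분배하면 된다.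
--   # 왜냐하면, Z는 X, Y 중 아무 곳에나 넣을 수 있으며, X와 Y가 최대한 균등해야 제곱의 합이 최소가 되기 때문이다.
--   while s_off < len(S):
--     if not S[s_off]:
--       s_off += 1
--       continue
--
--     while not T[t_off]:
--       t_off += 1
--
--     dist = abs(s_off - t_off)
--     K += dist // 2
--
--     if dist % 2:
--       Z += 1
--
--     s_off += 1
--     t_off += 1
--
--   if Z % 2:
--     return (K + Z // 2) ** 2 + (K + Z // 2 + 1) ** 2
--   else:
--     return 2 * ((K + Z // 2) ** 2)
-- ===== SOURCE B (Python) =====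
-- def solve(N, M, S, T):
--     if N * M == 0:
--         return 0
--     # CDF sweep: instead of pairing the k-th ones, sum over every position i the
--     # imbalance |#ones of S in [0..i] - #ones of T in [0..i]| (T's running count
--     # capped at S's total, since surplus ones of T are never matched).
--     m = sum(1 for x in S if x)
--     cs = ct = D = 0
--     for i in range(max(len(S), len(T))):
--         if i < len(S) and S[i]:
--             cs += 1
--         if i < len(T) and T[i] and ct < m:
--             ct += 1
--         D += abs(cs - ct)
--     h = D // 2
--     return h * h + (h + 1) ** 2 if D % 2 else 2 * h * h
-- ===== Notes on version B (the rewrite author's own statement) =====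
-- stated objective: alternative
-- what changed: Replaces A's greedy pairing of the k-th ones of S and T (offset-chasing double while loop accumulating K and Z per matched pair) by a CDF sweep: one pass over positions summing the running-count imbalance |#ones of S so far - #ones of T so far| (T capped at S's total), which equals the same total distance; no pairing or inner scan remains.
import Mathlib
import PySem

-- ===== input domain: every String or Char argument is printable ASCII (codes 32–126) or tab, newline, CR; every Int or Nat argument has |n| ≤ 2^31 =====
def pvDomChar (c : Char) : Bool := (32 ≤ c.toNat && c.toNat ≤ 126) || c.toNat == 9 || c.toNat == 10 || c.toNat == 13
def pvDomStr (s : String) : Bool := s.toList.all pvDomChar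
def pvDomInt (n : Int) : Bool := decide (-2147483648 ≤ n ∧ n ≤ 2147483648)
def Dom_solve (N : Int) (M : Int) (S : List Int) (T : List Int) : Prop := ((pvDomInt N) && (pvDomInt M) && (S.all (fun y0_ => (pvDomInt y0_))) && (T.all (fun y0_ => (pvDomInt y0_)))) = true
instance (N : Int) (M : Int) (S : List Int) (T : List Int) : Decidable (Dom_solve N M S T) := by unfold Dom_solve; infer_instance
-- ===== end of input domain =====

-- B replaces A's greedy pairing of k-th ones by a CDF sweep over positions summing running-count imbalances (alternative algorithm, same cost).


-- ===== PORT A =====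
-- inner 'while not T[t_off]: t_off += 1'; where Python would raise IndexError (t past the end) Pre_ excludes the input
def findT (T : List Int) (t : Nat) : Nat :=
  if h : t < T.length then
    if T[t] = 0 then findT T (t + 1) else t
  else t
termination_by T.length - t

-- the main 'while s_off < len(S)' loop, state (s_off, t_off, K, Z)
def loopA (S T : List Int) (s t : Nat) (K Z : Int) : Int × Int :=
  if h : s < S.length then
    if S[s] = 0 then loopA S T (s + 1) t K Z
    else
      let t' := findT T t
      let dist : Int := |(s : Int) - (t' : Int)|
      loopA S T (s + 1) (t' + 1) (K + PySem.Int.floordiv dist 2)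
        (if PySem.Int.mod dist 2 ≠ 0 then Z + 1 else Z)
  else (K, Z)
termination_by S.length - s

def solve (N : Int) (M : Int) (S : List Int) (T : List Int) : Int :=
  if N * M = 0 then 0
  else
    let KZ := loopA S T 0 0 0 0
    let K := KZ.1
    let Z := KZ.2
    if PySem.Int.mod Z 2 ≠ 0 then
      (K + PySem.Int.floordiv Z 2) ^ 2 + (K + PySem.Int.floordiv Z 2 + 1) ^ 2
    else
      2 * (K + PySem.Int.floordiv Z 2) ^ 2

-- ===== PORT B =====
-- CDF sweep: one pass i = 0 .. max(len S, len T) - 1 with state (cs, ct, D);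
-- cs/ct are the running counts of ones seen (ct capped at m = total ones of S), D the summed imbalance
def solve_alt (N : Int) (M : Int) (S : List Int) (T : List Int) : Int :=
  if N * M = 0 then 0
  else
    let m : Int := ((S.filter (fun x => x ≠ 0)).length : Int)
    let st := (List.range (max S.length T.length)).foldl
      (fun (st : Int × Int × Int) i =>
        let cs := if i < S.length ∧ S.getD i 0 ≠ 0 then st.1 + 1 else st.1
        let ct := if i < T.length ∧ T.getD i 0 ≠ 0 ∧ st.2.1 < m then st.2.1 + 1 else st.2.1
        (cs, ct, st.2.2 + |cs - ct|)) ((0 : Int), (0 : Int), (0 : Int))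
    let D := st.2.2
    let h := PySem.Int.floordiv D 2
    if PySem.Int.mod D 2 ≠ 0 then h * h + (h + 1) ^ 2 else 2 * (h * h)

-- ===== PRECONDITION & SPEC =====
-- Pre_ excludes exactly the inputs where A raises IndexError: N*M ≠ 0 and S has more nonzero entries than T
def Pre_solve (N : Int) (M : Int) (S : List Int) (T : List Int) : Prop :=
  N * M = 0 ∨ S.countP (fun x => x ≠ 0) ≤ T.countP (fun x => x ≠ 0)
instance (N : Int) (M : Int) (S : List Int) (T : List Int) : Decidable (Pre_solve N M S T) := by unfold Pre_solve; infer_instance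

def pvWitness_solve : Int × Int × List Int × List Int := (2, 3, [1, 0, 1], [0, 1, 0, 1])

def Spec_solve (N : Int) (M : Int) (S : List Int) (T : List Int) (out : Int) : Prop := out = solve_alt N M S T
instance (N : Int) (M : Int) (S : List Int) (T : List Int) (out : Int) : Decidable (Spec_solve N M S T out) := by unfold Spec_solve; infer_instance

-- ===== CLAIM (what is proved, stated in full; the proofs are below) =====
def Claim_equal_solve : Prop := ∀ (N : Int) (M : Int) (S : List Int) (T : List Int), Dom_solve N M S T → Pre_solve N M S T → Spec_solve N M S T (solve N M S T)

-- ===== LEMMAS AND PROOFS =====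

-- (K, Z) contributions of matching the k-th ones, and the plain total distance
def pair2 : List Int → List Int → Int × Int
  | a :: ps, b :: pt =>
      let d := |a - b|
      let r := pair2 ps pt
      (d / 2 + r.1, d % 2 + r.2)
  | _, _ => (0, 0)

def pairSum : List Int → List Int → Int
  | a :: ps, b :: pt => |a - b| + pairSum ps pt
  | _, _ => 0

-- positions of nonzero entries at indices ≥ s
def P (L : List Int) (s : Nat) : List Int :=
  ((PySem.List.enumerate (L.drop s) (s : Int)).filter (fun p => p.2 ≠ 0)).map (fun p => p.1)

-- number of elements ≤ i
def cntLe (a : List Int) (i : Int) : Int := ((a.filter (fun x => x ≤ i)).length : Int)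

-- number of nonzero entries at indices ≤ j (j : Int, may be negative)
def cUpTo : List Int → Int → Int
  | [], _ => 0
  | x :: l, j => (if x ≠ 0 ∧ 0 ≤ j then 1 else 0) + cUpTo l (j - 1)

lemma P_stop (L : List Int) (s : Nat) (h : L.length ≤ s) : P L s = [] := by
  simp [P, List.drop_eq_nil_of_le h]

lemma P_cons (L : List Int) (s : Nat) (h : s < L.length) :
    P L s = (if L[s] = 0 then [] else [(s : Int)]) ++ P L (s + 1) := by
  unfold P
  rw [List.drop_eq_getElem_cons h, PySem.List.enumerate_cons]
  by_cases hz : L[s] = 0 <;> simp [hz]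

lemma pair2_nil (pt : List Int) : pair2 [] pt = (0, 0) := by
  cases pt <;> rfl

lemma findT_spec (T : List Int) (t : Nat) (b : Int) (rest : List Int)
    (h : P T t = b :: rest) :
    ((findT T t : Int) = b ∧ P T (findT T t + 1) = rest) := by
  by_cases ht : t < T.length
  · by_cases hz : T[t] = 0
    · rw [P_cons T t ht, if_pos hz, List.nil_append] at h
      rw [findT, dif_pos ht, if_pos hz]
      exact findT_spec T (t + 1) b rest h
    · rw [P_cons T t ht, if_neg hz] at h
      rw [findT, dif_pos ht, if_neg hz]
      simp only [List.cons_append, List.nil_append, List.cons.injEq] at h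
      exact ⟨h.1.symm ▸ rfl, h.2.symm ▸ rfl⟩
  · rw [P_stop T t (by omega)] at h; cases h
termination_by T.length - t

lemma loopA_eq (S T : List Int) (s t : Nat) (K Z : Int)
    (h : (P S s).length ≤ (P T t).length) :
    loopA S T s t K Z
      = (K + (pair2 (P S s) (P T t)).1, Z + (pair2 (P S s) (P T t)).2) := by
  by_cases hs : s < S.length
  · by_cases hz : S[s] = 0
    · rw [loopA, dif_pos hs, if_pos hz]
      rw [P_cons S s hs, if_pos hz, List.nil_append] at h ⊢
      exact loopA_eq S T (s + 1) t K Z h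
    · rw [loopA, dif_pos hs, if_neg hz]
      rw [P_cons S s hs, if_neg hz] at h ⊢
      simp only [List.cons_append, List.nil_append] at h ⊢
      obtain ⟨b, rest, hT⟩ : ∃ b rest, P T t = b :: rest := by
        cases hPT : P T t with
        | nil => rw [hPT] at h; simp at h
        | cons b rest => exact ⟨b, rest, rfl⟩
      obtain ⟨hb, hrest⟩ := findT_spec T t b rest hT
      rw [hT] at h ⊢
      rw [loopA_eq S T (s + 1) (findT T t + 1) _ _ (by simpa [hrest] using Nat.le_of_succ_le_succ (by simpa using h))]
      rw [hrest, hb]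
      have hd2 : PySem.Int.floordiv |(s : Int) - b| 2 = |(s : Int) - b| / 2 :=
        PySem.Int.floordiv_eq_ediv_of_pos (by omega)
      have hm2 : PySem.Int.mod |(s : Int) - b| 2 = |(s : Int) - b| % 2 :=
        PySem.Int.mod_eq_emod_of_pos (by omega)
      simp only [pair2, hd2, hm2]
      have hm := Int.emod_two_eq (|(s : Int) - b|)
      simp only [Prod.mk.injEq]
      constructor
      · ring
      · by_cases ho : |(s : Int) - b| % 2 = 0
        · simp [ho]
        · have h1 : |(s : Int) - b| % 2 = 1 := by omega
          simp [h1]; omega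
  · rw [loopA, dif_neg hs, P_stop S s (by omega), pair2_nil]
    simp
termination_by S.length - s

lemma countP_enumerate (l : List Int) (s : Int) :
    List.countP (fun p => decide (p.2 ≠ 0)) (PySem.List.enumerate l s)
      = List.countP (fun x => decide (x ≠ 0)) l := by
  induction l generalizing s with
  | nil => simp [PySem.List.enumerate]
  | cons a l ih =>
      rw [PySem.List.enumerate_cons, List.countP_cons, List.countP_cons, ih (s + 1)]

lemma P_length (L : List Int) : (P L 0).length = L.countP (fun x => decide (x ≠ 0)) := by
  simp only [P, List.drop_zero, Nat.cast_zero, List.length_map, ← List.countP_eq_length_filter]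
  simpa using countP_enumerate L 0

-- 2K + Z is the plain total distance
lemma pair2_pairSum (a b : List Int) :
    2 * (pair2 a b).1 + (pair2 a b).2 = pairSum a b := by
  induction a generalizing b with
  | nil => rw [pair2_nil]; cases b <;> simp [pairSum]
  | cons x a ih =>
      cases b with
      | nil => simp [pair2, pairSum]
      | cons y b =>
          simp only [pair2, pairSum]
          have := ih b
          have h2 : 2 * (|x - y| / 2) + |x - y| % 2 = |x - y| := by omega
          omega

lemma pairSum_take (a b : List Int) : pairSum a b = pairSum a (b.take a.length) := by
  induction a generalizing b with
  | nil => cases b <;> rfl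
  | cons x a ih =>
      cases b with
      | nil => rfl
      | cons y b => simp only [pairSum, List.length_cons, List.take_succ_cons]; rw [ih b]

lemma cntLe_nonneg (a : List Int) (i : Int) : 0 ≤ cntLe a i := by
  simp [cntLe]

lemma cntLe_cons (x : Int) (l : List Int) (i : Int) :
    cntLe (x :: l) i = (if x ≤ i then 1 else 0) + cntLe l i := by
  by_cases h : x ≤ i <;> simp [cntLe, h] <;> push_cast <;> ring

lemma cntLe_zero_of_lt (b : List Int) (i : Int) (h : ∀ z ∈ b, i < z) : cntLe b i = 0 := by
  have : b.filter (fun x => x ≤ i) = [] := by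
    apply List.filter_eq_nil_iff.mpr
    intro z hz
    simp only [decide_eq_true_eq]
    exact not_le.mpr (h z hz)
  simp [cntLe, this]

-- capped count = count of the truncated (sorted) list
lemma cntLe_take_min (b : List Int) (m : Nat) (i : Int) (hs : List.Pairwise (· < ·) b) :
    cntLe (b.take m) i = min (cntLe b i) (m : Int) := by
  induction b generalizing m with
  | nil => simp [cntLe]
  | cons y b ih =>
      cases m with
      | zero =>
          have := cntLe_nonneg (y :: b) i
          simp only [List.take_zero, Nat.cast_zero]
          have h0 : cntLe ([] : List Int) i = 0 := by simp [cntLe]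
          omega
      | succ m =>
          have hb := hs.tail
          have hy : ∀ z ∈ b, y < z := fun z hz => List.rel_of_pairwise_cons hs hz
          rw [List.take_succ_cons, cntLe_cons, cntLe_cons, ih m hb]
          by_cases hyi : y ≤ i
          · have := cntLe_nonneg b i
            simp only [if_pos hyi]
            push_cast
            omega
          · have h0 : cntLe b i = 0 := cntLe_zero_of_lt b i (fun z hz => lt_trans (not_le.mp hyi) (hy z hz))
            simp only [if_neg hyi, h0]
            push_cast
            omega

lemma cUpTo_neg (l : List Int) (j : Int) (h : j < 0) : cUpTo l j = 0 := by
  induction l generalizing j with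
  | nil => rfl
  | cons x l ih =>
      simp only [cUpTo, ih (j - 1) (by omega), add_zero]
      rw [if_neg (fun hc => absurd hc.2 (by omega))]

lemma cUpTo_nonneg (l : List Int) (j : Int) : 0 ≤ cUpTo l j := by
  induction l generalizing j with
  | nil => simp [cUpTo]
  | cons x l ih =>
      simp only [cUpTo]
      have := ih (j - 1)
      by_cases h : x ≠ 0 ∧ 0 ≤ j <;> simp [h] <;> omega

lemma cUpTo_step (S : List Int) (k : Nat) :
    cUpTo S (k : Int) = cUpTo S ((k : Int) - 1)
      + (if k < S.length ∧ S.getD k 0 ≠ 0 then 1 else 0) := by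
  induction S generalizing k with
  | nil => simp [cUpTo]
  | cons x l ih =>
      cases k with
      | zero =>
          simp only [cUpTo, List.getD_cons_zero, List.length_cons, Nat.cast_zero]
          rw [cUpTo_neg l (0 - 1) (by omega), cUpTo_neg l (0 - 1 - 1) (by omega)]
          split_ifs <;> omega
      | succ n =>
          have e : ((n + 1 : Nat) : Int) = (n : Int) + 1 := by push_cast; ring
          have hstep := ih n
          simp only [cUpTo, List.getD_cons_succ, List.length_cons, e, add_sub_cancel_right]
          split_ifs at hstep ⊢ <;> omega

-- enumerate with shifted start
lemma enumerate_shift (l : List Int) (s : Int) :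
    PySem.List.enumerate l (s + 1) = (PySem.List.enumerate l s).map (fun p => (p.1 + 1, p.2)) := by
  induction l generalizing s with
  | nil => simp [PySem.List.enumerate]
  | cons x l ih =>
      rw [PySem.List.enumerate_cons, PySem.List.enumerate_cons, List.map_cons, ih (s + 1)]

lemma P_shift (x : Int) (l : List Int) :
    P (x :: l) 1 = (P l 0).map (· + 1) := by
  unfold P
  simp only [List.drop_one, List.tail_cons, List.drop_zero, Nat.cast_one, Nat.cast_zero]
  rw [show (1 : Int) = 0 + 1 by ring, enumerate_shift]
  rw [List.filter_map, List.map_map, List.map_map]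
  rw [List.filter_congr (fun p _ => rfl)]
  apply List.map_congr_left
  intro p _
  simp

lemma cntLe_map_add_one (ps : List Int) (j : Int) :
    cntLe (ps.map (· + 1)) j = cntLe ps (j - 1) := by
  induction ps with
  | nil => simp [cntLe]
  | cons a ps ih =>
      rw [List.map_cons, cntLe_cons, cntLe_cons, ih]
      have : (a + 1 ≤ j) ↔ (a ≤ j - 1) := by omega
      by_cases h : a ≤ j - 1
      · rw [if_pos h, if_pos (this.mpr h)]
      · rw [if_neg h, if_neg (fun hh => h (this.mp hh))]

lemma cntLe_P (S : List Int) (j : Int) : cntLe (P S 0) j = cUpTo S j := by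
  induction S generalizing j with
  | nil => rw [P_stop _ 0 (by simp)]; simp [cntLe, cUpTo]
  | cons x l ih =>
      rw [P_cons (x :: l) 0 (by simp), P_shift]
      simp only [cUpTo]
      by_cases hx : (x :: l)[0] = 0
      · have hx' : ¬ (x ≠ 0) := by simpa using hx
        rw [if_pos hx, List.nil_append, cntLe_map_add_one, ih]
        simp [hx']
      · have hx' : x ≠ 0 := by simpa using hx
        rw [if_neg hx, List.cons_append, List.nil_append, cntLe_cons, cntLe_map_add_one, ih]
        simp only [Nat.cast_zero]
        by_cases hj : 0 ≤ j <;> simp [hj, hx']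

-- P's elements are the indices s ≤ · < length, strictly increasing
lemma P_bounds_sorted (L : List Int) (s : Nat) :
    (∀ x ∈ P L s, (s : Int) ≤ x ∧ x < (L.length : Int)) ∧ List.Pairwise (· < ·) (P L s) := by
  by_cases h : s < L.length
  · obtain ⟨ihb, ihs⟩ := P_bounds_sorted L (s + 1)
    rw [P_cons L s h]
    by_cases hz : L[s] = 0
    · rw [if_pos hz, List.nil_append]
      exact ⟨fun x hx => ⟨by have := (ihb x hx).1; omega, (ihb x hx).2⟩, ihs⟩
    · rw [if_neg hz, List.cons_append, List.nil_append]
      constructor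
      · intro x hx
        rcases List.mem_cons.mp hx with rfl | hx
        · constructor <;> [omega; exact_mod_cast h]
        · exact ⟨by have := (ihb x hx).1; omega, (ihb x hx).2⟩
      · exact List.pairwise_cons.mpr ⟨fun x hx => by have := (ihb x hx).1; omega, ihs⟩
  · rw [P_stop L s (by omega)]; simp
termination_by L.length - s

-- Σ_{i<L} [y ≤ i] = L - y  (0 ≤ y ≤ L)
lemma sum_ind (L : Nat) (y : Int) (h0 : 0 ≤ y) (hL : y ≤ (L : Int)) :
    ∑ i ∈ Finset.range L, (if y ≤ (i : Int) then (1 : Int) else 0) = (L : Int) - y := by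
  induction L with
  | zero => simp; omega
  | succ n ih =>
      rw [Finset.sum_range_succ]
      by_cases hy : y ≤ (n : Int)
      · rw [ih hy, if_pos hy]; push_cast; ring
      · have hyn : y = (n : Int) + 1 := by push_cast at hL; omega
        rw [if_neg hy, Finset.sum_eq_zero (fun i hi => by
          rw [if_neg]; have := Finset.mem_range.mp hi; omega)]
        push_cast; omega

-- Σ_{i<L} |[x ≤ i] - [y ≤ i]| = |x - y|  (0 ≤ x, y < L)
lemma sum_interval (L : Nat) (x y : Int) (hx : 0 ≤ x ∧ x < (L : Int)) (hy : 0 ≤ y ∧ y < (L : Int)) :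
    ∑ i ∈ Finset.range L, |(if x ≤ (i : Int) then (1 : Int) else 0) - (if y ≤ (i : Int) then 1 else 0)| = |x - y| := by
  rcases le_total x y with hxy | hxy
  · have : ∀ i ∈ Finset.range L,
        |(if x ≤ (i : Int) then (1 : Int) else 0) - (if y ≤ (i : Int) then 1 else 0)|
          = (if x ≤ (i : Int) then (1 : Int) else 0) - (if y ≤ (i : Int) then 1 else 0) := by
      intro i _
      by_cases h1 : x ≤ (i : Int) <;> by_cases h2 : y ≤ (i : Int) <;>
        simp [h1, h2] <;> omega
    rw [Finset.sum_congr rfl this, Finset.sum_sub_distrib,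
        sum_ind L x hx.1 (by omega), sum_ind L y hy.1 (by omega)]
    rw [abs_of_nonpos (by omega)]; ring
  · have : ∀ i ∈ Finset.range L,
        |(if x ≤ (i : Int) then (1 : Int) else 0) - (if y ≤ (i : Int) then 1 else 0)|
          = (if y ≤ (i : Int) then (1 : Int) else 0) - (if x ≤ (i : Int) then 1 else 0) := by
      intro i _
      by_cases h1 : x ≤ (i : Int) <;> by_cases h2 : y ≤ (i : Int) <;>
        simp [h1, h2] <;> omega
    rw [Finset.sum_congr rfl this, Finset.sum_sub_distrib,
        sum_ind L y hy.1 (by omega), sum_ind L x hx.1 (by omega)]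
    rw [abs_of_nonneg (by omega)]; ring

-- the CDF identity: for matched sorted lists, summed count-imbalance = summed pair distance
lemma sweep_eq_pairSum (a b : List Int) (L : Nat) (hlen : a.length = b.length)
    (ha : List.Pairwise (· < ·) a) (hb : List.Pairwise (· < ·) b)
    (hba : ∀ x ∈ a, 0 ≤ x ∧ x < (L : Int)) (hbb : ∀ x ∈ b, 0 ≤ x ∧ x < (L : Int)) :
    ∑ i ∈ Finset.range L, |cntLe a (i : Int) - cntLe b (i : Int)| = pairSum a b := by
  induction a generalizing b with
  | nil =>
      cases b with
      | nil => simp [cntLe, pairSum]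
      | cons y b => simp at hlen
  | cons x a ih =>
      cases b with
      | nil => simp at hlen
      | cons y b =>
          have hxa : ∀ z ∈ a, x < z := fun z hz => List.rel_of_pairwise_cons ha hz
          have hyb : ∀ z ∈ b, y < z := fun z hz => List.rel_of_pairwise_cons hb hz
          have key : ∀ i ∈ Finset.range L,
              |cntLe (x :: a) (i : Int) - cntLe (y :: b) (i : Int)|
                = |(if x ≤ (i : Int) then (1 : Int) else 0) - (if y ≤ (i : Int) then 1 else 0)|
                  + |cntLe a (i : Int) - cntLe b (i : Int)| := by
            intro i _
            rw [cntLe_cons, cntLe_cons]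
            have ha0 := cntLe_nonneg a (i : Int)
            have hb0 := cntLe_nonneg b (i : Int)
            by_cases h1 : x ≤ (i : Int) <;> by_cases h2 : y ≤ (i : Int)
            · simp only [if_pos h1, if_pos h2, Int.abs_eq_natAbs]; omega
            · have hbz : cntLe b (i : Int) = 0 :=
                cntLe_zero_of_lt b _ (fun z hz => lt_trans (not_le.mp h2) (hyb z hz))
              simp only [if_pos h1, if_neg h2, Int.abs_eq_natAbs]; omega
            · have haz : cntLe a (i : Int) = 0 :=
                cntLe_zero_of_lt a _ (fun z hz => lt_trans (not_le.mp h1) (hxa z hz))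
              simp only [if_neg h1, if_pos h2, Int.abs_eq_natAbs]; omega
            · simp only [if_neg h1, if_neg h2, Int.abs_eq_natAbs]; omega
          rw [Finset.sum_congr rfl key, Finset.sum_add_distrib,
              sum_interval L x y (hba x (by simp)) (hbb y (by simp)),
              ih (ha := ha.tail) (hba := fun z hz => hba z (by simp [hz])) b
                (by simpa using hlen) hb.tail (fun z hz => hbb z (by simp [hz]))]
          rfl

-- B's fold over range k: closed form of the state
lemma loopB_inv (S T : List Int) (m : Int) (hm : 0 ≤ m) (k : Nat) :
    (List.range k).foldl
      (fun (st : Int × Int × Int) i =>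
        let cs := if i < S.length ∧ S.getD i 0 ≠ 0 then st.1 + 1 else st.1
        let ct := if i < T.length ∧ T.getD i 0 ≠ 0 ∧ st.2.1 < m then st.2.1 + 1 else st.2.1
        (cs, ct, st.2.2 + |cs - ct|)) ((0 : Int), (0 : Int), (0 : Int))
      = (cUpTo S ((k : Int) - 1), min (cUpTo T ((k : Int) - 1)) m,
          ∑ i ∈ Finset.range k, |cUpTo S (i : Int) - min (cUpTo T (i : Int)) m|) := by
  induction k with
  | zero =>
      simp only [List.range_zero, List.foldl_nil, Finset.range_zero, Finset.sum_empty,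
        Nat.cast_zero]
      rw [cUpTo_neg S _ (by omega), cUpTo_neg T _ (by omega),
        show min (0 : Int) m = 0 from by omega]
  | succ n ih =>
      rw [List.range_succ, List.foldl_append, ih, List.foldl_cons, List.foldl_nil]
      have e : ((n + 1 : Nat) : Int) - 1 = (n : Int) := by push_cast; ring
      have hcs : (if n < S.length ∧ S.getD n 0 ≠ 0
            then cUpTo S ((n : Int) - 1) + 1 else cUpTo S ((n : Int) - 1))
          = cUpTo S (n : Int) := by
        have := cUpTo_step S n; split_ifs at this ⊢ <;> omega
      have hct : (if n < T.length ∧ T.getD n 0 ≠ 0 ∧ min (cUpTo T ((n : Int) - 1)) m < m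
            then min (cUpTo T ((n : Int) - 1)) m + 1 else min (cUpTo T ((n : Int) - 1)) m)
          = min (cUpTo T (n : Int)) m := by
        have h1 := cUpTo_step T n
        have h2 := cUpTo_nonneg T ((n : Int) - 1)
        split_ifs at h1 ⊢ <;> omega
      simp only [e, hcs, hct, Prod.mk.injEq, Finset.sum_range_succ]

-- ===== VERDICT (by name: the statement is the Claim_ definition above) =====
theorem solve_spec : Claim_equal_solve := by
  intro N M S T _ hpre
  unfold Spec_solve solve solve_alt
  by_cases h0 : N * M = 0
  · simp [h0]
  · simp only [if_neg h0]
    have hc : S.countP (fun x => x ≠ 0) ≤ T.countP (fun x => x ≠ 0) := by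
      rcases hpre with h | h
      · exact absurd h h0
      · exact h
    have hlen : (P S 0).length ≤ (P T 0).length := by
      rw [P_length, P_length]; exact_mod_cast hc
    have hmS : ((S.filter (fun x => x ≠ 0)).length : Int) = ((P S 0).length : Int) := by
      rw [P_length, List.countP_eq_length_filter]
    rw [loopA_eq S T 0 0 0 0 hlen]
    rw [loopB_inv S T ((S.filter (fun x => x ≠ 0)).length : Int) (by positivity)
      (max S.length T.length)]
    set Lm := max S.length T.length with hLm
    set ps := P S 0 with hps
    set pt := P T 0 with hpt
    set m : Int := ((S.filter (fun x => x ≠ 0)).length : Int) with hm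
    set mN := ps.length with hmN
    have hmm : m = (mN : Int) := hmS
    have htklen : (pt.take mN).length = mN := by
      rw [List.length_take]; omega
    have hsorted_ps : List.Pairwise (· < ·) ps := (P_bounds_sorted S 0).2
    have hsorted_pt : List.Pairwise (· < ·) pt := (P_bounds_sorted T 0).2
    have hsorted_tk : List.Pairwise (· < ·) (pt.take mN) :=
      List.Pairwise.sublist (List.take_sublist mN pt) hsorted_pt
    have hbs : ∀ x ∈ ps, 0 ≤ x ∧ x < (Lm : Int) := by
      intro x hx
      have h := (P_bounds_sorted S 0).1 x hx
      refine ⟨by exact_mod_cast h.1, lt_of_lt_of_le h.2 ?_⟩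
      exact_mod_cast Nat.le_max_left S.length T.length
    have hbt : ∀ x ∈ pt.take mN, 0 ≤ x ∧ x < (Lm : Int) := by
      intro x hx
      have h := (P_bounds_sorted T 0).1 x (List.mem_of_mem_take hx)
      refine ⟨by exact_mod_cast h.1, lt_of_lt_of_le h.2 ?_⟩
      exact_mod_cast Nat.le_max_right S.length T.length
    have hcongr : ∀ i ∈ Finset.range Lm,
        |cUpTo S (i : Int) - min (cUpTo T (i : Int)) m|
          = |cntLe ps (i : Int) - cntLe (pt.take mN) (i : Int)| := by
      intro i _
      rw [cntLe_take_min pt mN (i : Int) hsorted_pt, ← hmm, cntLe_P, cntLe_P]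
    have hsum : (∑ i ∈ Finset.range Lm, |cUpTo S (i : Int) - min (cUpTo T (i : Int)) m|)
        = 2 * (pair2 ps pt).1 + (pair2 ps pt).2 := by
      rw [Finset.sum_congr rfl hcongr,
          sweep_eq_pairSum ps (pt.take mN) Lm htklen.symm hsorted_ps hsorted_tk hbs hbt,
          ← pairSum_take, pair2_pairSum]
    simp only [hsum, zero_add]
    set K := (pair2 ps pt).1
    set Z := (pair2 ps pt).2
    have hD2 : PySem.Int.floordiv (2 * K + Z) 2 = (2 * K + Z) / 2 :=
      PySem.Int.floordiv_eq_ediv_of_pos (by omega)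
    have hDm : PySem.Int.mod (2 * K + Z) 2 = (2 * K + Z) % 2 :=
      PySem.Int.mod_eq_emod_of_pos (by omega)
    have hZ2 : PySem.Int.floordiv Z 2 = Z / 2 :=
      PySem.Int.floordiv_eq_ediv_of_pos (by omega)
    have hZm : PySem.Int.mod Z 2 = Z % 2 :=
      PySem.Int.mod_eq_emod_of_pos (by omega)
    simp only [hD2, hDm, hZ2, hZm]
    have hpar : (2 * K + Z) % 2 = Z % 2 := by omega
    have hdiv : (2 * K + Z) / 2 = K + Z / 2 := by omega
    rw [hpar, hdiv]
    by_cases hz : Z % 2 = 0 <;> simp [hz] <;> ring
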